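-- pv_equiv track=rewrite | github.com/mufrad2004/Tugas-Akhir | 02-0_Dataset/2_Pembuatan_JSON.py | parse_show_run_ospf_config
-- ===== SOURCE A (Python) =====
-- def parse_show_run_ospf_config(ospf_config_output):
--     """Parse 'show run | section router ospf' → router-id, redistribute, passive"""
--     router_id = None
--     redistribute = False
--     passive = []
--
--     for line in ospf_config_output.splitlines():
--         line = line.strip()
--         if "router-id" in line:
--             router_id = line.split()[1]
--         if line.startswith("redistribute eigrp"):
--             if "subnets" in line:
--                 redistribute = True
--             else:
--                 redistribute = False
--         if "passive-interface" in line: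
--             intf = line.split()[1]
--             passive.append(intf)
--
--     return router_id, redistribute, passive
-- ===== SOURCE B (Python) =====
-- def parse_show_run_ospf_config(ospf_config_output):
--     """Parse 'show run | section router ospf' -> router-id, redistribute, passive"""
--     lines = [line.strip() for line in ospf_config_output.splitlines()]
--     passive = [l.split()[1] for l in lines if "passive-interface" in l]
--     router_id = next((l.split()[1] for l in reversed(lines) if "router-id" in l), None)
--     red_line = next((l for l in reversed(lines) if l.startswith("redistribute eigrp")), None)
--     redistribute = red_line is not None and "subnets" in red_line
--     return router_id, redistribute, passive
-- ===== Notes on version B (the rewrite author's own statement) =====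
-- stated objective: simpler
-- what changed: Replaces A's single stateful loop over lines with independent passes: a comprehension collecting passive interfaces, and reversed-scan first-match lookups (next(...)) for the last router-id line and the last 'redistribute eigrp' line.
import Mathlib
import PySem

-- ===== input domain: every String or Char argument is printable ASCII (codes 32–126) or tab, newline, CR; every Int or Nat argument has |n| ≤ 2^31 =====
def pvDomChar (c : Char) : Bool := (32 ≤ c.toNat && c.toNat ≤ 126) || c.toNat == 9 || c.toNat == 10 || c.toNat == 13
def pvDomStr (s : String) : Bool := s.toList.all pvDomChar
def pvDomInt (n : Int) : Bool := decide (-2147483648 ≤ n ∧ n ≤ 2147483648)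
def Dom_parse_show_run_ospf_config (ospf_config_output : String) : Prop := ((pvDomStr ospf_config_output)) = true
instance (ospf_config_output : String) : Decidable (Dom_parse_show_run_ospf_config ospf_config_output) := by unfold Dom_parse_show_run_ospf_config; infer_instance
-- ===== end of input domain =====

-- B replaces A's single stateful loop with independent passes (a comprehension for passive
-- interfaces and reversed-scan lookups for the last router-id / redistribute lines): simpler.

-- ===== PORT A =====
-- A's single loop over splitlines with state (router_id, redistribute, passive).
-- line.split()[1] is pyGet? …; the .getD "" arm is unreachable under Pre_ (Python raises there).
def parse_show_run_ospf_config (ospf_config_output : String) : Option String × Bool × List String :=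
  (PySem.Str.splitlines ospf_config_output).foldl
    (fun st line0 =>
      let line := PySem.Str.strip line0
      let st :=
        if PySem.Str.isIn "router-id" line then
          (some ((PySem.List.pyGet? (PySem.Str.split₀ line) 1).getD ""), st.2.1, st.2.2)
        else st
      let st :=
        if PySem.Str.startswith line "redistribute eigrp" then
          (st.1, (if PySem.Str.isIn "subnets" line then true else false), st.2.2)
        else st
      let st :=
        if PySem.Str.isIn "passive-interface" line then
          (st.1, st.2.1, st.2.2 ++ [(PySem.List.pyGet? (PySem.Str.split₀ line) 1).getD ""])
        else st
      st)
    (none, false, [])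

-- ===== PORT B =====
-- B: strip once, a filtered-map for passive, reversed-scan first matches for the other two.
def parse_show_run_ospf_config_alt (ospf_config_output : String) : Option String × Bool × List String :=
  let lines := (PySem.Str.splitlines ospf_config_output).map PySem.Str.strip
  let passive := (lines.filter (fun l => PySem.Str.isIn "passive-interface" l)).map
      (fun l => (PySem.List.pyGet? (PySem.Str.split₀ l) 1).getD "")
  let router_id := lines.reverse.findSome?
      (fun l => if PySem.Str.isIn "router-id" l then
                  some ((PySem.List.pyGet? (PySem.Str.split₀ l) 1).getD "") else none)
  let red_line := lines.reverse.find? (fun l => PySem.Str.startswith l "redistribute eigrp")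
  let redistribute := match red_line with
    | some l => PySem.Str.isIn "subnets" l
    | none => false
  (router_id, redistribute, passive)

-- ===== PRECONDITION & SPEC =====
-- Pre_ excludes exactly the inputs on which A raises IndexError: a stripped line containing
-- "router-id" or "passive-interface" whose split() has fewer than 2 tokens.
def Pre_parse_show_run_ospf_config (ospf_config_output : String) : Prop :=
  ∀ l ∈ (PySem.Str.splitlines ospf_config_output).map PySem.Str.strip,
    (PySem.Str.isIn "router-id" l = true → 2 ≤ (PySem.Str.split₀ l).length) ∧
    (PySem.Str.isIn "passive-interface" l = true → 2 ≤ (PySem.Str.split₀ l).length)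
instance (ospf_config_output : String) : Decidable (Pre_parse_show_run_ospf_config ospf_config_output) := by unfold Pre_parse_show_run_ospf_config; infer_instance

def pvWitness_parse_show_run_ospf_config : String :=
  " router-id 1.1.1.1\n redistribute eigrp 100 subnets\n passive-interface Gig0/1\nhello"

def Spec_parse_show_run_ospf_config (ospf_config_output : String) (out : Option String × Bool × List String) : Prop := out = parse_show_run_ospf_config_alt ospf_config_output
instance (ospf_config_output : String) (out : Option String × Bool × List String) : Decidable (Spec_parse_show_run_ospf_config ospf_config_output out) := by unfold Spec_parse_show_run_ospf_config; infer_instance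

-- ===== CLAIM (what is proved, stated in full; the proofs are below) =====
def Claim_equal_parse_show_run_ospf_config : Prop := ∀ (ospf_config_output : String), Dom_parse_show_run_ospf_config ospf_config_output → Pre_parse_show_run_ospf_config ospf_config_output → Spec_parse_show_run_ospf_config ospf_config_output (parse_show_run_ospf_config ospf_config_output)

-- ===== LEMMAS AND PROOFS =====

-- abbreviation used only by the proofs: line.split()[1]
def pvTok (l : String) : String := (PySem.List.pyGet? (PySem.Str.split₀ l) 1).getD ""

-- generic loop invariant: A's one-pass fold over stripped lines, with the three line tests
-- abstracted, equals B's three independent passes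
lemma pvFoldl_gen (q1 q2 q4 : String → Bool) (q3 : String → Bool) (tk : String → String)
    (ms : List String) (r : Option String) (b : Bool) (p : List String) :
    ms.foldl (fun st l =>
        let st := if q1 l then (some (tk l), st.2.1, st.2.2) else st
        let st := if q2 l then (st.1, q3 l, st.2.2) else st
        let st := if q4 l then (st.1, st.2.1, st.2.2 ++ [tk l]) else st
        st) (r, b, p) =
      ( match ms.reverse.findSome? (fun l => if q1 l then some (tk l) else none) with
        | some x => some x
        | none => r
      , match ms.reverse.find? q2 with
        | some l => q3 l
        | none => b
      , p ++ (ms.filter q4).map tk ) := by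
  induction ms generalizing r b p with
  | nil => simp
  | cons h t ih =>
      simp only [List.foldl_cons, List.reverse_cons, List.filter_cons,
        List.findSome?_append, List.find?_append, List.findSome?_cons, List.findSome?_nil,
        List.find?_cons, List.find?_nil]
      by_cases h1 : q1 h <;> by_cases h2 : q2 h <;> by_cases h4 : q4 h <;>
        simp only [h1, h2, h4, if_true, if_false, Bool.false_eq_true, ih, List.map_cons] <;>
        cases t.reverse.findSome? (fun l => if q1 l then some (tk l) else none) <;>
        cases t.reverse.find? q2 <;>
        simp [Option.or]

set_option maxHeartbeats 1000000 in
lemma pvA_eq (s : String) :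
    parse_show_run_ospf_config s =
      ((PySem.Str.splitlines s).map PySem.Str.strip).foldl (fun st l =>
        let st := if PySem.Str.isIn "router-id" l then (some (pvTok l), st.2.1, st.2.2) else st
        let st := if PySem.Str.startswith l "redistribute eigrp" then
                    (st.1, (if PySem.Str.isIn "subnets" l then true else false), st.2.2) else st
        let st := if PySem.Str.isIn "passive-interface" l then
                    (st.1, st.2.1, st.2.2 ++ [pvTok l]) else st
        st) (none, false, []) := by
  rw [List.foldl_map]
  rfl

-- ===== VERDICT (by name: the statement is the Claim_ definition above) =====
set_option maxHeartbeats 1000000 in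
theorem parse_show_run_ospf_config_spec : Claim_equal_parse_show_run_ospf_config := by
  intro s _ _
  show _ = _
  rw [pvA_eq, pvFoldl_gen]
  simp only [parse_show_run_ospf_config_alt, pvTok]
  refine congrArg₂ Prod.mk ?_ (congrArg₂ Prod.mk ?_ ?_)
  · cases (((PySem.Str.splitlines s).map PySem.Str.strip).reverse.findSome?
        (fun l => if PySem.Str.isIn "router-id" l then
          some ((PySem.List.pyGet? (PySem.Str.split₀ l) 1).getD "") else none)) <;> rfl
  · cases (((PySem.Str.splitlines s).map PySem.Str.strip).reverse.find?
        (fun l => PySem.Str.startswith l "redistribute eigrp")) with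
    | none => rfl
    | some l => simp
  · refine congrArg _ (congrArg _ (List.filter_congr ?_))
    intro l _
    simp
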